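-- pv_equiv track=rewrite | github.com/adamjermyn/CAMstars | CAMstars/Parsers/apogee.py | checkParams
-- ===== SOURCE A (Python) =====
-- def checkParams(bitmask):
-- 	'''
-- 	Checks if there are any warnings at BAD-level on the ASPCAP parameter bitmasks
-- 	and returns True if so (else False). For documentation see
-- 	http://www.sdss.org/dr14/algorithms/bitmasks/#APOGEE_STARFLAG
-- 	'''
-- 	if bitmask < 0:
-- 		bitmask += 2**32
-- 	bitstr = '{0:032b}'.format(bitmask)
-- 	bits = list(bool(int(b)) for b in bitstr)
-- 	ignorebits = [3,4,5,6,7,8,9,10,11,12,13,14,15,17,18,19,20,21,22,23,24,25,26,27,28,29,30,31] # For bad-level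
-- #	ignorebits = [3,4,5,6,7,11,12,13,14,15,17,18,19,20,21,22,23,24,25,26,27,28,29,30,31] # For warning-level
-- 	for i,b in enumerate(bits):
-- 		if i not in ignorebits and b:
-- 			return True
-- 	return False
-- ===== SOURCE B (Python) =====
-- def checkParams(bitmask):
-- 	'''
-- 	Checks if there are any warnings at BAD-level on the ASPCAP parameter bitmasks
-- 	and returns True if so (else False). The BAD-level flags are bits 31, 30, 29
-- 	and 15 of the 32-bit mask (positions 0, 1, 2 and 16 MSB-first); test them
-- 	directly with arithmetic shifts instead of formatting a binary string.
-- 	'''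
-- 	return any((bitmask >> s) & 1 for s in (31, 30, 29, 15))
-- ===== Notes on version B (the rewrite author's own statement) =====
-- stated objective: simpler
-- what changed: Replaces formatting the wrapped bitmask as a fixed-width binary string and scanning it with an index loop against an ignore list by four direct shift-and-mask tests of the bad-level bit positions.
import Mathlib
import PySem

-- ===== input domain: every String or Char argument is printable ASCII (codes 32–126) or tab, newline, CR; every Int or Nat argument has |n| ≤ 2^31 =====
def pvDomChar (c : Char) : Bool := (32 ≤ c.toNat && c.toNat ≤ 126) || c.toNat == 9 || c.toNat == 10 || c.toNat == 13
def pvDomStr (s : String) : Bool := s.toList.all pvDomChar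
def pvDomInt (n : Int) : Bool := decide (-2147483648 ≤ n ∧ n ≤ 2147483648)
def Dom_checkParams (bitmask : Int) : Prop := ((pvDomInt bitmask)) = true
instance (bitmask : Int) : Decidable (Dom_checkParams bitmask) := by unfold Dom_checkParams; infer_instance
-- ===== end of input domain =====

-- B replaces A's 32-character binary-string formatting and indexed scan by four direct
-- shift-and-mask bit tests (objective: simpler).

-- ===== PORT A =====
-- '{0:032b}'.format(m) fused with the `bool(int(b)) for b in bitstr` comprehension:
-- width-w MSB-first list of bits; exact rendering of the Python pair of steps for 0 ≤ m < 2^w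
-- (inside Dom the wrapped bitmask always satisfies 0 ≤ m < 2^32).
def fmtBits (m : Int) : Nat → List Bool
  | 0 => []
  | w + 1 => fmtBits (PySem.Int.floordiv m 2) w ++ [PySem.Int.mod m 2 == 1]

def ignorebits : List Nat := [3,4,5,6,7,8,9,10,11,12,13,14,15,17,18,19,20,21,22,23,24,25,26,27,28,29,30,31]

-- the `for i,b in enumerate(bits): if i not in ignorebits and b: return True` loop
def loopA : Nat → List Bool → Bool
  | _, [] => false
  | i, b :: rest => if (!(ignorebits.contains i)) && b then true else loopA (i + 1) rest

def checkParams (bitmask : Int) : Bool :=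
  let m := if bitmask < 0 then bitmask + 2 ^ 32 else bitmask
  loopA 0 (fmtBits m 32)

-- ===== PORT B =====
-- any((bitmask >> s) & 1 for s in (31, 30, 29, 15)); (x >> s) & 1 is x // 2^s % 2,
-- and the generator element is truthy iff that value is nonzero.
def checkParams_alt (bitmask : Int) : Bool :=
  [31, 30, 29, 15].any (fun s => PySem.Int.mod (PySem.Int.floordiv bitmask (2 ^ s)) 2 != 0)

-- ===== PRECONDITION & SPEC =====
def Spec_checkParams (bitmask : Int) (out : Bool) : Prop := out = checkParams_alt bitmask
instance (bitmask : Int) (out : Bool) : Decidable (Spec_checkParams bitmask out) := by unfold Spec_checkParams; infer_instance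

-- ===== CLAIM (what is proved, stated in full; the proofs are below) =====
def Claim_equal_checkParams : Prop := ∀ (bitmask : Int), Dom_checkParams bitmask → Spec_checkParams bitmask (checkParams bitmask)

-- ===== LEMMAS AND PROOFS =====

-- the formatted bit list, read LSB-first, is the list of binary digits
theorem fmtBits_rev (w : Nat) : ∀ (m : Nat),
    (fmtBits (m : Int) w).reverse = (List.range w).map (fun i => decide (m / 2 ^ i % 2 = 1)) := by
  induction w with
  | zero => intro m; simp [fmtBits]
  | succ w ih =>
    intro m
    have h2 : PySem.Int.floordiv (m : Int) 2 = ((m / 2 : Nat) : Int) := by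
      rw [PySem.Int.floordiv_eq_ediv_of_pos (by norm_num)]; omega
    have h3 : PySem.Int.mod (m : Int) 2 = ((m % 2 : Nat) : Int) := by
      rw [PySem.Int.mod_eq_emod_of_pos (by norm_num)]; omega
    simp only [fmtBits, h2, h3, List.reverse_append, List.reverse_cons, List.reverse_nil,
      List.nil_append, List.cons_append, ih, List.range_succ_eq_map, List.map_cons, List.map_map]
    refine List.cons_eq_cons.mpr ⟨?_, ?_⟩
    · rcases Nat.mod_two_eq_zero_or_one m with h | h <;> simp [h]
    · exact List.map_congr_left fun i _ => by
        simp [Function.comp, Nat.div_div_eq_div_mul, pow_succ, Nat.mul_comm]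

-- ===== VERDICT (by name: the statement is the Claim_ definition above) =====
theorem checkParams_spec : Claim_equal_checkParams := by
  intro bitmask hdom
  have hb : -2147483648 ≤ bitmask ∧ bitmask ≤ 2147483648 := by
    simpa [Dom_checkParams, pvDomInt] using hdom
  show checkParams bitmask = checkParams_alt bitmask
  obtain ⟨n, hn⟩ : ∃ n : Nat, (if bitmask < 0 then bitmask + 2 ^ 32 else bitmask) = (n : Int) := by
    refine ⟨(if bitmask < 0 then bitmask + 2 ^ 32 else bitmask).toNat, ?_⟩
    split_ifs <;> omega
  have hfmt : fmtBits (if bitmask < 0 then bitmask + 2 ^ 32 else bitmask) 32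
      = ((List.range 32).map (fun i => decide (n / 2 ^ i % 2 = 1))).reverse := by
    rw [hn, ← fmtBits_rev, List.reverse_reverse]
  have hrange : List.range 32 =
      [0,1,2,3,4,5,6,7,8,9,10,11,12,13,14,15,16,17,18,19,20,21,22,23,24,25,26,27,28,29,30,31] := by
    decide
  simp only [checkParams, checkParams_alt]
  rw [hfmt, hrange]
  norm_num [loopA, ignorebits, List.any_cons, List.any_nil]

  rw [Bool.eq_iff_iff]
  simp only [Bool.or_eq_true, decide_eq_true_eq, bne_iff_ne]
  split_ifs at hn <;> omega
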